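-- pv_equiv track=rewrite | github.com/arturylab/computational-chemistry | tools-and-utilities/orca/get_properties.py | get_magnetic
-- ===== SOURCE A (Python) =====
-- def get_magnetic(content: str) -> float:
--     """
--     Extracts the magnetic spin population value from the given content.
--
--     This function searches for the phrase "Sum of atomic spin populations"
--     in the provided content string. If found, it retrieves the last value
--     on the corresponding line, which represents the spin population.
--
--     Args:
--         content (str): The content string to search for the spin population,
--         typically from an ORCA output file.
--     Returns:
--         float: The extracted spin population value if the phrase is found,
--                otherwise None.
--     """
--
--     word = "Sum of atomic spin populations"
--
--     if word in content:
--         lines = content.splitlines()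
--         for i in range(len(lines) -1, -1, -1):
--             if word in lines[i]:
--                 spin_popluation = lines[i].split()[-1]
--                 return spin_popluation
--     else:
--         return None
-- ===== SOURCE B (Python) =====
-- def get_magnetic(content: str):
--     word = "Sum of atomic spin populations"
--     result = None
--     for line in content.splitlines():
--         if word in line:
--             result = line.split()[-1]
--     return result
-- ===== Notes on version B (the rewrite author's own statement) =====
-- stated objective: simpler
-- what changed: Replaces the whole-string membership pre-check plus backward indexed scan with early return by a single forward pass over the lines that keeps the last matching line's token in an accumulator.
import Mathlib
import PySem

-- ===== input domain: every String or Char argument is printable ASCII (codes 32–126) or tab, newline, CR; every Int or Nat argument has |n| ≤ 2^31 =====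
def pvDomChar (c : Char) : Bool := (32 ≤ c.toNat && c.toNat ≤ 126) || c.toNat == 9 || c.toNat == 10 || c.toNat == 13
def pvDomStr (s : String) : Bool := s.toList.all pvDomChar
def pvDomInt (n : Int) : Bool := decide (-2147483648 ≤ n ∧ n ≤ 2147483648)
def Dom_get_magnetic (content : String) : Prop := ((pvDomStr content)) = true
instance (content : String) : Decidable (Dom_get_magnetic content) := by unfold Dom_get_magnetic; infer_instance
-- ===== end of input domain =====

-- B replaces A's whole-string membership pre-check plus backward indexed scan with early
-- return by a single forward pass over the lines keeping the last match (objective: simpler).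

-- ===== PORT A =====
-- The early 'return' inside the backward loop is modelled by an Option-of-Option
-- accumulator (some v = already returned v, none = still looping).
-- 'lines[i].split()[-1]' would raise IndexError on a line with no tokens, but a line
-- containing the (non-whitespace) search phrase always splits non-empty, so the 'none'
-- that pyGet? yields there is unreachable.
def get_magnetic (content : String) : Option String :=
  let word := "Sum of atomic spin populations"
  if PySem.Str.isIn word content then
    let lines := PySem.Str.splitlines content
    let r :=
      (PySem.List.pyRange ((lines.length : Int) - 1) (-1) (-1)).foldl
        (fun st i =>
          match st with
          | some v => some v
          | none =>
            match PySem.List.pyGet? lines i with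
            | some line =>
              if PySem.Str.isIn word line then
                some (PySem.List.pyGet? (PySem.Str.split₀ line) (-1))
              else none
            | none => none)
        none
    match r with
    | some v => v
    | none => none
  else none

-- ===== PORT B =====
-- same remark: the 'none' of pyGet? (Python's IndexError) is unreachable
def get_magnetic_alt (content : String) : Option String :=
  let word := "Sum of atomic spin populations"
  (PySem.Str.splitlines content).foldl
    (fun result line =>
      if PySem.Str.isIn word line then PySem.List.pyGet? (PySem.Str.split₀ line) (-1)
      else result)
    none

-- ===== PRECONDITION & SPEC =====
def Spec_get_magnetic (content : String) (out : Option String) : Prop := out = get_magnetic_alt content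
instance (content : String) (out : Option String) : Decidable (Spec_get_magnetic content out) := by unfold Spec_get_magnetic; infer_instance

-- ===== CLAIM (what is proved, stated in full; the proofs are below) =====
def Claim_equal_get_magnetic : Prop := ∀ (content : String), Dom_get_magnetic content → Spec_get_magnetic content (get_magnetic content)

-- ===== LEMMAS AND PROOFS =====

-- the step of A's backward loop keeps an already-returned value
theorem pvFoldKeepSome (xs : List String) (word : String)
    (l : List Int) (v : Option String) (f : String → Option String) :
    l.foldl
      (fun st i =>
        match st with
        | some v => some v
        | none =>
          match PySem.List.pyGet? xs i with
          | some line => if PySem.Str.isIn word line then some (f line) else none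
          | none => none)
      (some v) = some v := by
  induction l with
  | nil => rfl
  | cons a t ih => simpa using ih

-- A's backward first-match scan over the index range equals B's forward last-match fold
theorem pvBackScan (xs : List String) (word : String) (f : String → Option String) :
    (match
      (PySem.List.pyRange ((xs.length : Int) - 1) (-1) (-1)).foldl
        (fun st i =>
          match st with
          | some v => some v
          | none =>
            match PySem.List.pyGet? xs i with
            | some line => if PySem.Str.isIn word line then some (f line) else none
            | none => none)
        none with
    | some v => v
    | none => none)
    = xs.foldl (fun result line => if PySem.Str.isIn word line then f line else result) none := by
  induction xs using List.reverseRecOn with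
  | nil => simp [PySem.List.pyRange_neg_one_eq_nil]
  | append_singleton xs x ih =>
      have hlen : (((xs ++ [x]).length : Int)) - 1 = ((xs.length : Nat) : Int) := by
        simp
      rw [hlen, PySem.List.pyRange_neg_one_cons (by omega), List.foldl_cons]
      have hget : PySem.List.pyGet? (xs ++ [x]) ((xs.length : Nat) : Int) = some x := by
        rw [PySem.List.pyGet?_natCast, List.getElem?_concat_length]
      simp only [hget]
      by_cases hp : PySem.Str.isIn word x = true
      · simp only [hp, if_true, pvFoldKeepSome, List.foldl_append, List.foldl_cons,
          List.foldl_nil]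
      · simp only [Bool.not_eq_true] at hp
        simp only [hp, Bool.false_eq_true, if_false, List.foldl_append, List.foldl_cons,
          List.foldl_nil]
        rw [PySem.List.foldl_congr_mem _ _
          (fun st i =>
            match st with
            | some v => some v
            | none =>
              match PySem.List.pyGet? xs i with
              | some line => if PySem.Str.isIn word line then some (f line) else none
              | none => none) _
          (by
            intro st i hi
            obtain ⟨h1, h2⟩ := PySem.List.mem_pyRange_neg_one.mp hi
            obtain ⟨k, rfl⟩ : ∃ k : Nat, i = (k : Int) := ⟨i.toNat, by omega⟩
            have hk : k < xs.length := by omega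
            simp only [PySem.List.pyGet?_natCast, List.getElem?_append_left hk])]
        rw [ih]

-- invariant of splitlines' worker: everything it emits is a stored line of acc,
-- the current line cur.reverse extended by a prefix of s, or an infix of s
theorem pvGoInfix (isB : Char → Bool) :
    ∀ (s cur : List Char) (acc : List (List Char)) (l : List Char),
      l ∈ PySem.Chars.splitlines.go isB s cur acc →
      l ∈ acc ∨ (∃ t, t <+: s ∧ l = cur.reverse ++ t) ∨ l <:+: s := by
  intro s cur acc
  induction s, cur, acc using PySem.Chars.splitlines.go.induct (isB := isB) with
  | case1 cur acc hcur =>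
      intro l h
      rw [PySem.Chars.splitlines.go.eq_def] at h
      split at h
      · rw [if_pos hcur] at h
        exact Or.inl (List.mem_reverse.mp h)
      · rename_i heq
        exact (List.cons_ne_nil _ _ heq.symm).elim
      · rename_i heq
        exact (List.cons_ne_nil _ _ heq.symm).elim
  | case2 cur acc hcur =>
      intro l h
      rw [PySem.Chars.splitlines.go.eq_def] at h
      split at h
      case h_2 heq => exact (List.cons_ne_nil _ _ heq.symm).elim
      case h_3 heq => exact (List.cons_ne_nil _ _ heq.symm).elim
      rw [if_neg hcur] at h
      rw [List.mem_reverse] at h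
      rcases List.mem_cons.mp h with h | h
      · exact Or.inr (Or.inl ⟨[], List.nil_prefix, by simp [h]⟩)
      · exact Or.inl h
  | case3 rest cur acc ih =>
      intro l h
      rw [PySem.Chars.splitlines.go.eq_def] at h
      split at h
      case h_1 heq => exact (List.cons_ne_nil _ _ heq).elim
      case h_3 hne2 heq =>
        cases heq
        exact (hne2 rest rfl rfl).elim
      case h_2 heq =>
        cases heq
        have hsuf : rest <:+ '\x0d' :: '\n' :: rest :=
          (List.suffix_cons '\n' rest).trans (List.suffix_cons '\x0d' _)
        rcases ih l h with h' | ⟨t, ht, rfl⟩ | h'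
        · rcases List.mem_cons.mp h' with h'' | h''
          · exact Or.inr (Or.inl ⟨[], List.nil_prefix, by simp [h'']⟩)
          · exact Or.inl h''
        · exact Or.inr (Or.inr (by simpa using ht.isInfix.trans hsuf.isInfix))
        · exact Or.inr (Or.inr (h'.trans hsuf.isInfix))
  | case4 c rest cur acc hne hb ih =>
      intro l h
      rw [PySem.Chars.splitlines.go.eq_def] at h
      split at h
      case h_1 heq => exact (List.cons_ne_nil _ _ heq).elim
      case h_2 heq =>
        cases heq
        exact (hne _ rfl rfl).elim
      case h_3 hne2 heq =>
        cases heq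
        rw [if_pos hb] at h
        rcases ih l h with h' | ⟨t, ht, rfl⟩ | h'
        · rcases List.mem_cons.mp h' with h'' | h''
          · exact Or.inr (Or.inl ⟨[], List.nil_prefix, by simp [h'']⟩)
          · exact Or.inl h''
        · exact Or.inr (Or.inr (by simpa using ht.isInfix.trans (List.suffix_cons c rest).isInfix))
        · exact Or.inr (Or.inr (h'.trans (List.suffix_cons c rest).isInfix))
  | case5 c rest cur acc hne hb ih =>
      intro l h
      rw [PySem.Chars.splitlines.go.eq_def] at h
      split at h
      case h_1 heq => exact (List.cons_ne_nil _ _ heq).elim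
      case h_2 heq =>
        cases heq
        exact (hne _ rfl rfl).elim
      case h_3 hne2 heq =>
        cases heq
        rw [if_neg hb] at h
        rcases ih l h with h' | ⟨t, ht, rfl⟩ | h'
        · exact Or.inl h'
        · exact Or.inr (Or.inl ⟨c :: t, by simpa using ht, by simp⟩)
        · exact Or.inr (Or.inr (h'.trans (List.suffix_cons c rest).isInfix))

-- every line produced by splitlines is an infix of the original character list
theorem pvMemSplitlinesInfix (s l : List Char)
    (h : l ∈ PySem.Chars.splitlines s) : l <:+: s := by
  unfold PySem.Chars.splitlines at h
  rcases pvGoInfix _ s [] [] l h with h' | ⟨t, ht, rfl⟩ | h'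
  · simp at h'
  · simpa using ht.isInfix
  · exact h'

-- ===== VERDICT (by name: the statement is the Claim_ definition above) =====
theorem get_magnetic_spec : Claim_equal_get_magnetic := by
  intro content _
  unfold Spec_get_magnetic get_magnetic get_magnetic_alt
  by_cases h : PySem.Str.isIn "Sum of atomic spin populations" content = true
  · simp only [h, if_true]
    exact pvBackScan (PySem.Str.splitlines content) "Sum of atomic spin populations"
      (fun line => PySem.List.pyGet? (PySem.Str.split₀ line) (-1))
  · simp only [Bool.not_eq_true] at h
    simp only [h, Bool.false_eq_true, if_false]
    have hall : ∀ line ∈ PySem.Str.splitlines content,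
        PySem.Str.isIn "Sum of atomic spin populations" line = false := by
      intro line hl
      rcases hx : PySem.Str.isIn "Sum of atomic spin populations" line with _ | _
      · rfl
      · exfalso
        have h1 := (PySem.Str.isIn_iff_infix _ line).mp hx
        have h2 : line.toList <:+: content.toList := by
          apply pvMemSplitlinesInfix
          rw [← PySem.Str.splitlines_map_toList]
          exact List.mem_map_of_mem hl
        have hT : PySem.Str.isIn "Sum of atomic spin populations" content = true :=
          (PySem.Str.isIn_iff_infix _ content).mpr (h1.trans h2)
        rw [h] at hT
        exact Bool.false_ne_true hT
    rw [PySem.List.foldl_congr_mem _ _ (fun result _ => result) _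
      (by
        intro acc x hx
        have hx' := hall x hx
        simp only [hx', Bool.false_eq_true, if_false]),
      PySem.List.foldl_ignore]
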